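-- pv_equiv track=rewrite | github.com/saitejapln1210/Web-Applications | week1/problem5/binaryrespresntatrion_o(n).py | binaryrespresentationofintegers
-- ===== SOURCE A (Python) =====
-- def binaryrespresentationofintegers(number):
--     result=[]
--     result.append(0)
--     for i in range(1,number+1):
--         if i%2==0:
--             result.append(result[i>>1])# if even ,appending half of number present in result
--         else:
--             result.append(result[i>>1]+1)# if odd ,appending half of number present in result and plus 1
--     return result
-- ===== SOURCE B (Python) =====
-- def binaryrespresentationofintegers(number):
--     res = [0]
--     for i in range(1, number + 1):
--         res.append(bin(i).count('1'))
--     return res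
-- ===== Notes on version B (the rewrite author's own statement) =====
-- stated objective: idiomatic
-- what changed: Replaces the DP recurrence that reads back res[i>>1] (plus one when i is odd) with an independent per-element popcount via bin(i).count('1'), keeping the same seed element and loop bounds.
import Mathlib
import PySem

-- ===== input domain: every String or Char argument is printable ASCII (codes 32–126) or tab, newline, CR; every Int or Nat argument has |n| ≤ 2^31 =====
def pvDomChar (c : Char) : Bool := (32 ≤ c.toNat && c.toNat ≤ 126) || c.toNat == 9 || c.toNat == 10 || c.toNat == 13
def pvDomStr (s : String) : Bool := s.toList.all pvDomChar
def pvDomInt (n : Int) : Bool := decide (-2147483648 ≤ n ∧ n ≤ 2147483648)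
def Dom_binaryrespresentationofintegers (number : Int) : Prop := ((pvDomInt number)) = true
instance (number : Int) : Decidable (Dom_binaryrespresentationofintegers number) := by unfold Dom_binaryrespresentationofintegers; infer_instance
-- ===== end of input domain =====

-- ===== PORT A =====
-- A: seed [0], then for i in range(1, number+1) append result[i>>1] (+1 if i odd).
-- i>>1 on i ≥ 1 is i//2 = PySem.Int.floordiv i 2; the index is always in range, so pyGetD is exact here.
def binaryrespresentationofintegers (number : Int) : List Int :=
  (PySem.List.pyRange 1 (number + 1) 1).foldl
    (fun result i =>
      if PySem.Int.mod i 2 = 0 then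
        result ++ [PySem.List.pyGetD result (PySem.Int.floordiv i 2) 0]
      else
        result ++ [PySem.List.pyGetD result (PySem.Int.floordiv i 2) 0 + 1])
    [0]

-- ===== PORT B =====
-- B: seed [0]; each appended value is bin(i).count('1'), ported as PySem.Int.bitCount.
def binaryrespresentationofintegers_alt (number : Int) : List Int :=
  0 :: (PySem.List.pyRange 1 (number + 1) 1).map (fun i => (PySem.Int.bitCount i : Int))

-- ===== PRECONDITION & SPEC =====
def Spec_binaryrespresentationofintegers (number : Int) (out : List Int) : Prop := out = binaryrespresentationofintegers_alt number
instance (number : Int) (out : List Int) : Decidable (Spec_binaryrespresentationofintegers number out) := by unfold Spec_binaryrespresentationofintegers; infer_instance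

-- ===== CLAIM (what is proved, stated in full; the proofs are below) =====
def Claim_equal_binaryrespresentationofintegers : Prop := ∀ (number : Int), Dom_binaryrespresentationofintegers number → Spec_binaryrespresentationofintegers number (binaryrespresentationofintegers number)

-- ===== LEMMAS AND PROOFS =====

-- Invariant: after processing 1..n, A's accumulator is the popcount table for 0..n.
theorem pv_binary_table (n : Nat) :
    (PySem.List.pyRange 1 ((n : Int) + 1) 1).foldl
      (fun result i =>
        if PySem.Int.mod i 2 = 0 then
          result ++ [PySem.List.pyGetD result (PySem.Int.floordiv i 2) 0]
        else
          result ++ [PySem.List.pyGetD result (PySem.Int.floordiv i 2) 0 + 1])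
      [0]
    = (PySem.List.pyRange 0 ((n : Int) + 1) 1).map (fun i => (PySem.Int.bitCount i : Int)) := by
  induction n with
  | zero => decide
  | succ n ih =>
      push_cast
      rw [PySem.List.pyRange_one_succ_right (by omega : (1 : Int) ≤ (n : Int) + 1),
          PySem.List.pyRange_one_succ_right (by omega : (0 : Int) ≤ (n : Int) + 1),
          List.foldl_append, ih, List.map_append]
      simp only [List.foldl_cons, List.foldl_nil]
      have hmod : PySem.Int.mod ((n : Int) + 1) 2 = ((n + 1) % 2 : Nat) := by
        have := PySem.Int.mod_natCast (n + 1) 2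
        push_cast at this ⊢
        omega
      have hdiv : PySem.Int.floordiv ((n : Int) + 1) 2 = (((n + 1) / 2 : Nat) : Int) := by
        have := PySem.Int.floordiv_natCast (n + 1) 2
        push_cast at this ⊢
        omega
      have hget : PySem.List.pyGetD
          ((PySem.List.pyRange 0 ((n : Int) + 1) 1).map (fun i => (PySem.Int.bitCount i : Int)))
          (PySem.Int.floordiv ((n : Int) + 1) 2) 0
          = (PySem.Int.bitCount (PySem.Int.floordiv ((n : Int) + 1) 2) : Int) := by
        exact PySem.List.pyGetD_map_pyRange_of_nonneg _ _ _ _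
          (by rw [hdiv]; positivity) (by rw [hdiv]; push_cast; omega)
      have hrec : (PySem.Int.bitCount ((n : Int) + 1) : Int)
          = (PySem.Int.bitCount (PySem.Int.floordiv ((n : Int) + 1) 2) : Int)
            + PySem.Int.mod ((n : Int) + 1) 2 := by
        have h := PySem.Int.bitCount_of_pos (n := (n : Int) + 1) (by omega)
        rw [h, hmod]
        push_cast
        have : (PySem.Int.mod ((n : Int) + 1) 2).toNat = ((n + 1) % 2 : Nat) := by
          rw [hmod]; omega
        omega
      simp only [List.map_cons, List.map_nil]
      by_cases hpar : PySem.Int.mod ((n : Int) + 1) 2 = 0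
      · rw [if_pos hpar, hget, hrec, hpar]; ring_nf
      · rw [if_neg hpar, hget]
        have h2 : PySem.Int.mod ((n : Int) + 1) 2 = 1 := by rw [hmod] at hpar ⊢; omega
        rw [hrec, h2]

-- ===== VERDICT (by name: the statement is the Claim_ definition above) =====
theorem binaryrespresentationofintegers_spec : Claim_equal_binaryrespresentationofintegers := by
  intro number _
  unfold Spec_binaryrespresentationofintegers binaryrespresentationofintegers binaryrespresentationofintegers_alt
  by_cases h : 0 ≤ number
  · obtain ⟨n, rfl⟩ := Int.eq_ofNat_of_zero_le h
    rw [pv_binary_table n,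
        PySem.List.pyRange_one_cons (by omega : (0 : Int) < (n : Int) + 1)]
    simp
  · rw [PySem.List.pyRange_one_eq_nil (by omega)]
    simp
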